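-- pv_equiv track=rewrite | github.com/rjovelin/CRM_POPVAR | sites_with_coverage.py | get_intergenic_sites
-- ===== SOURCE A (Python) =====
-- def get_intergenic_sites(chromo_sites, gene_sites, pirna_sites, mirna_sites, UTR_sites, remove_pirna_mirna_utr):
--     '''
--     (dict, dict, dict, dict, dict, bool) -> dict
--     Take the dictionnary with allele counts for all sites with coverage in the
--     genome, the dictionaries with all sites corresponding to genes, piRNAs, miRNAs
--     and predicted UTRs, a boolean to specify whether pirnas, mirna and UTRs
--     should be removed (=True) or whether only the sites between annotated genes
--     should be removed (=False) and return a modified dictionary with allele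
--     counts for intergenic sites only
--     Precondition: all indices in all dicts are 0-based
--     '''
--
--     # remove all sites falling at protein coding gene loci
--     # loop over chromo in genic_sites
--     for chromo in gene_sites:
--         # check that chromo in chromo sites
--         if chromo in chromo_sites:
--             # loop over gene positions on that chromo
--             for i in gene_sites[chromo]:
--                 # check if site is on chromo in chromo_sites
--                 if i in chromo_sites[chromo]:
--                     del chromo_sites[chromo][i]
--
--     # check if all intergenic sites are kept or of small RNAs and UTR are removed
--     if remove_pirna_mirna_utr == True:
--         # do not consider intergenic sites falling at pirna and mirna loci and UTRs
--
--         # remove all sites corresponding to piRNAs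
--         for chromo in pirna_sites:
--             # check if chromo in chromo_sites
--             if chromo in chromo_sites:
--                 # loop over pirna positions on that chromo
--                 for i in pirna_sites[chromo]:
--                     # check if site on chromo in chromo-sites
--                     if i in chromo_sites[chromo]:
--                         # remove site
--                         del chromo_sites[chromo][i]
--
--         # remove all sites corresponding to mirnas
--         for chromo in mirna_sites:
--             # check if chromo in chromo sites
--             if chromo in chromo_sites:
--                 # loop over mirna positions on that chromo
--                 for i in mirna_sites[chromo]:
--                     # check if site on chromo in chromo_sites
--                     if i in chromo_sites[chromo]:
--                         # remove site
--                         del chromo_sites[chromo][i]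
--
--         # remove sites coreresponding to predicted UTRs
--         for chromo in UTR_sites:
--             # check if chromo in chromo_sites:
--             if chromo in chromo_sites:
--                 # loop over positions on that chromo
--                 for i in UTR_sites[chromo]:
--                     # check if site on that chromo in chromo_sites
--                     if i in chromo_sites[chromo]:
--                         # remove site
--                         del chromo_sites[chromo][i]
--
--     return chromo_sites
-- ===== SOURCE B (Python) =====
-- def get_intergenic_sites(chromo_sites, gene_sites, pirna_sites, mirna_sites, UTR_sites, remove_pirna_mirna_utr):
--     # Rebuild instead of delete: for each chromosome in chromo_sites, compute the set of
--     # annotated positions and REBUILD the inner dict by a comprehension keeping only the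
--     # non-annotated positions, reassigning chromo_sites[chromo]; returns the mutated dict.
--     for chromo in list(chromo_sites):
--         annotated = set(gene_sites.get(chromo, ()))
--         if remove_pirna_mirna_utr == True:
--             annotated.update(pirna_sites.get(chromo, ()))
--             annotated.update(mirna_sites.get(chromo, ()))
--             annotated.update(UTR_sites.get(chromo, ()))
--         chromo_sites[chromo] = {pos: counts
--                                 for pos, counts in chromo_sites[chromo].items()
--                                 if pos not in annotated}
--     return chromo_sites
-- ===== Notes on version B (the rewrite author's own statement) =====
-- stated objective: alternative
-- what changed: A iterates the four annotation dicts and deletes each annotated key it finds in the coverage dict; B iterates the coverage data itself and rebuilds each chromosome's inner dict by a filtering comprehension that keeps only non-annotated positions (reassigning the inner dict rather than deleting keys).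
import Mathlib
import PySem

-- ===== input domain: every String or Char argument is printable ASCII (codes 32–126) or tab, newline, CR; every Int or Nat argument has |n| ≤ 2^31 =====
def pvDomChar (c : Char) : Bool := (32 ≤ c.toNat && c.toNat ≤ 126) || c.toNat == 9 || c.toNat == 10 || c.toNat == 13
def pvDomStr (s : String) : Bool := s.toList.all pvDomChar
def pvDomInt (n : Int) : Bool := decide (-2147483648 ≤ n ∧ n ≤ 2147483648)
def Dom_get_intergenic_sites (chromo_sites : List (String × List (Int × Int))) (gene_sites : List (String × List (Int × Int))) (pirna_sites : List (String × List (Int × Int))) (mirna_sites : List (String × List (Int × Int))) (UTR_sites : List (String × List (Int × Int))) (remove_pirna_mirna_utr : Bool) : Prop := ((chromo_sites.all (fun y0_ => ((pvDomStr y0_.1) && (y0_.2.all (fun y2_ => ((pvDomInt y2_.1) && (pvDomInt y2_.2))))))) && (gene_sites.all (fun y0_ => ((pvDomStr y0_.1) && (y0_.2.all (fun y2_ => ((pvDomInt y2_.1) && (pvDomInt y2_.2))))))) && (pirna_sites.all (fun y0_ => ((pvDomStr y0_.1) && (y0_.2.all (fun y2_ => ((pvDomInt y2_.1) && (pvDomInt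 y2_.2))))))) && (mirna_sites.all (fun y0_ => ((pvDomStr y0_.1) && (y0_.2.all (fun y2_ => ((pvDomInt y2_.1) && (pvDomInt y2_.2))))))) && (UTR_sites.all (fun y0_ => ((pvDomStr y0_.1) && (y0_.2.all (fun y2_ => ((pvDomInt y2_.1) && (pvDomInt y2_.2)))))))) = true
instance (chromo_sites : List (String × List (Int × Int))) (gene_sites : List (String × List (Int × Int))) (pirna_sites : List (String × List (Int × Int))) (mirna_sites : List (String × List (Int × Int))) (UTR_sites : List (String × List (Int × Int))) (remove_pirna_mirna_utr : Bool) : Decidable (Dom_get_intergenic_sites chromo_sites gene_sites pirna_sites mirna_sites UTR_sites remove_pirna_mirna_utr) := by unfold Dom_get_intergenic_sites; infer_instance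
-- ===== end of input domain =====

-- B rebuilds each inner dict by filtering out annotated positions instead of deleting keys
-- (return-value equivalence; A deletes in place, B reassigns rebuilt inner dicts).


-- ===== PORT A =====
-- A's four removal loops are the same block, kept as the helper pvPhase:
-- for chromo in ann: if chromo in chromo_sites: for i in ann[chromo]:
--   if i in chromo_sites[chromo]: del chromo_sites[chromo][i]
def pvPhase (cs : PySem.Dict String (PySem.Dict Int Int))
    (ann : List (String × List (Int × Int))) : PySem.Dict String (PySem.Dict Int Int) :=
  ann.foldl (fun cs p =>
    if cs.contains p.1 then
      (PySem.Dict.mk p.2).keys.foldl (fun cs i =>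
        if (cs.getD p.1 PySem.Dict.empty).contains i then
          cs.modify p.1 PySem.Dict.empty (fun d => d.erase i)
        else cs) cs
    else cs) cs

def get_intergenic_sites (chromo_sites : List (String × List (Int × Int))) (gene_sites : List (String × List (Int × Int))) (pirna_sites : List (String × List (Int × Int))) (mirna_sites : List (String × List (Int × Int))) (UTR_sites : List (String × List (Int × Int))) (remove_pirna_mirna_utr : Bool) : List (String × List (Int × Int)) :=
  let cs0 : PySem.Dict String (PySem.Dict Int Int) :=
    PySem.Dict.mk (chromo_sites.map (fun p => (p.1, PySem.Dict.mk p.2)))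
  let cs1 := pvPhase cs0 gene_sites
  let cs2 := if remove_pirna_mirna_utr == true then
      pvPhase (pvPhase (pvPhase cs1 pirna_sites) mirna_sites) UTR_sites
    else cs1
  cs2.items.map (fun p => (p.1, p.2.items))

-- ===== PORT B =====
-- ann.get(c, ()) as an iterable of positions: the keys of the inner dict
def pvGetKeys (ann : List (String × List (Int × Int))) (c : String) : List Int :=
  ((PySem.Dict.mk ann).getD c []).map (fun q => q.1)

-- B: one pass over chromo_sites; per chromosome build the annotated-position set, then
-- REBUILD the inner dict by a filtering comprehension keeping non-annotated positions
def get_intergenic_sites_alt (chromo_sites : List (String × List (Int × Int))) (gene_sites : List (String × List (Int × Int))) (pirna_sites : List (String × List (Int × Int))) (mirna_sites : List (String × List (Int × Int))) (UTR_sites : List (String × List (Int × Int))) (remove_pirna_mirna_utr : Bool) : List (String × List (Int × Int)) :=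
  chromo_sites.map (fun p =>
    let annotated : PySem.Set Int := PySem.Set.ofList (pvGetKeys gene_sites p.1)
    let annotated := if remove_pirna_mirna_utr == true then
        PySem.Set.update (PySem.Set.update (PySem.Set.update annotated
          (pvGetKeys pirna_sites p.1)) (pvGetKeys mirna_sites p.1)) (pvGetKeys UTR_sites p.1)
      else annotated
    (p.1, p.2.filter (fun q => !(PySem.Set.contains annotated q.1))))

-- ===== PRECONDITION & SPEC =====
-- Pre_ only requires each association list to carry pairwise-distinct keys: the six
-- arguments stand for Python dicts, which cannot hold duplicate keys, so Pre_ excludes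
-- no input the Python function can actually receive.
def Pre_get_intergenic_sites (chromo_sites : List (String × List (Int × Int))) (gene_sites : List (String × List (Int × Int))) (pirna_sites : List (String × List (Int × Int))) (mirna_sites : List (String × List (Int × Int))) (UTR_sites : List (String × List (Int × Int))) (remove_pirna_mirna_utr : Bool) : Prop :=
  (chromo_sites.map Prod.fst).Nodup ∧ (gene_sites.map Prod.fst).Nodup ∧
  (pirna_sites.map Prod.fst).Nodup ∧ (mirna_sites.map Prod.fst).Nodup ∧
  (UTR_sites.map Prod.fst).Nodup
instance (chromo_sites : List (String × List (Int × Int))) (gene_sites : List (String × List (Int × Int))) (pirna_sites : List (String × List (Int × Int))) (mirna_sites : List (String × List (Int × Int))) (UTR_sites : List (String × List (Int × Int))) (remove_pirna_mirna_utr : Bool) : Decidable (Pre_get_intergenic_sites chromo_sites gene_sites pirna_sites mirna_sites UTR_sites remove_pirna_mirna_utr) := by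
  unfold Pre_get_intergenic_sites; infer_instance
def pvWitness_get_intergenic_sites : (List (String × List (Int × Int))) × (List (String × List (Int × Int))) × (List (String × List (Int × Int))) × (List (String × List (Int × Int))) × (List (String × List (Int × Int))) × Bool :=
  ([("I", [(0, 2), (1, 3)]), ("II", [(4, 1)])], [("I", [(0, 5)])], [("II", [(4, 0)])], [], [], true)
def Spec_get_intergenic_sites (chromo_sites : List (String × List (Int × Int))) (gene_sites : List (String × List (Int × Int))) (pirna_sites : List (String × List (Int × Int))) (mirna_sites : List (String × List (Int × Int))) (UTR_sites : List (String × List (Int × Int))) (remove_pirna_mirna_utr : Bool) (out : List (String × List (Int × Int))) : Prop := out = get_intergenic_sites_alt chromo_sites gene_sites pirna_sites mirna_sites UTR_sites remove_pirna_mirna_utr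
instance (chromo_sites : List (String × List (Int × Int))) (gene_sites : List (String × List (Int × Int))) (pirna_sites : List (String × List (Int × Int))) (mirna_sites : List (String × List (Int × Int))) (UTR_sites : List (String × List (Int × Int))) (remove_pirna_mirna_utr : Bool) (out : List (String × List (Int × Int))) : Decidable (Spec_get_intergenic_sites chromo_sites gene_sites pirna_sites mirna_sites UTR_sites remove_pirna_mirna_utr out) := by unfold Spec_get_intergenic_sites; infer_instance

-- ===== CLAIM (what is proved, stated in full; the proofs are below) =====
def Claim_equal_get_intergenic_sites : Prop := ∀ (chromo_sites : List (String × List (Int × Int))) (gene_sites : List (String × List (Int × Int))) (pirna_sites : List (String × List (Int × Int))) (mirna_sites : List (String × List (Int × Int))) (UTR_sites : List (String × List (Int × Int))) (remove_pirna_mirna_utr : Bool), Dom_get_intergenic_sites chromo_sites gene_sites pirna_sites mirna_sites UTR_sites remove_pirna_mirna_utr → Pre_get_intergenic_sites chromo_sites gene_sites pirna_sites mirna_sites UTR_sites remove_pirna_mirna_utr → Spec_get_intergenic_sites chromo_sites gene_sites pirna_sites mirna_sites UTR_sites remove_pirna_mirna_utr (get_intergenic_sites chromo_sites gene_sites pirna_sites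 mirna_sites UTR_sites remove_pirna_mirna_utr)

-- ===== LEMMAS AND PROOFS =====

theorem pvErase_of_not_contains (d : PySem.Dict Int Int) (i : Int)
    (h : d.contains i = false) : d.erase i = d := by
  apply PySem.Dict.ext
  simp only [PySem.Dict.erase]
  apply List.filter_eq_self.mpr
  intro a ha
  simp only [PySem.Dict.contains, List.any_eq_false] at h
  simpa using h a ha

theorem pvEraseFold_items (L : List Int) (d : PySem.Dict Int Int) :
    (L.foldl (fun d i => d.erase i) d).items
      = d.items.filter (fun q => !L.contains q.1) := by
  induction L generalizing d with
  | nil => simp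
  | cons i L ih =>
      simp only [List.foldl_cons]
      rw [ih]
      show ((d.erase i).items.filter _) = _
      simp only [PySem.Dict.erase, List.filter_filter]
      apply List.filter_congr
      intro q _
      by_cases hqi : q.1 = i <;> simp [hqi, Bool.and_comm]

theorem pvModify_items (cs : PySem.Dict String (PySem.Dict Int Int)) (c : String)
    (f : PySem.Dict Int Int → PySem.Dict Int Int)
    (h : cs.contains c = true) (hnd : cs.keys.Nodup) :
    (cs.modify c PySem.Dict.empty f).items
      = cs.items.map (fun p => if p.1 == c then (c, f p.2) else p) := by
  show (cs.insert c (f (cs.getD c PySem.Dict.empty))).items = _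
  rw [PySem.Dict.items_insert_of_contains cs _ h]
  apply List.map_congr_left
  intro p hp
  by_cases hb : (p.1 == c) = true
  · have hget : cs.get? p.1 = some p.2 :=
      PySem.Dict.get?_of_mem_items cs (by simpa using hp) hnd
    have hc : p.1 = c := eq_of_beq hb
    simp [PySem.Dict.getD, ← hc, hget]
  · simp [hb]

theorem pvModify_id (cs : PySem.Dict String (PySem.Dict Int Int)) (c : String)
    (h : cs.contains c = true) (hnd : cs.keys.Nodup) :
    cs.modify c PySem.Dict.empty (fun d => d) = cs := by
  apply PySem.Dict.ext
  rw [pvModify_items cs c _ h hnd]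
  have : ∀ p ∈ cs.items, (if p.1 == c then (c, p.2) else p) = p := by
    intro p _
    by_cases hb : (p.1 == c) = true
    · have hc : p.1 = c := eq_of_beq hb
      simp [← hc]
    · simp [hb]
  rw [List.map_congr_left this]; simp

theorem pvModify_modify (cs : PySem.Dict String (PySem.Dict Int Int)) (c : String)
    (f g : PySem.Dict Int Int → PySem.Dict Int Int)
    (h : cs.contains c = true) (hnd : cs.keys.Nodup) :
    (cs.modify c PySem.Dict.empty f).modify c PySem.Dict.empty g
      = cs.modify c PySem.Dict.empty (fun d => g (f d)) := by
  apply PySem.Dict.ext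
  have h1 : (cs.modify c PySem.Dict.empty f).contains c = true := by
    rw [PySem.Dict.contains_modify]; simp
  have hk : (cs.modify c PySem.Dict.empty f).keys = cs.keys := by
    rw [PySem.Dict.keys_modify, PySem.Dict.keys_insert_of_contains _ _ h]
  rw [pvModify_items _ c g h1 (hk ▸ hnd), pvModify_items cs c f h hnd,
      pvModify_items cs c _ h hnd, List.map_map]
  apply List.map_congr_left
  intro p _
  by_cases hb : (p.1 == c) = true
  · simp [eq_of_beq hb]
  · have hb' : p.1 ≠ c := by simpa using hb
    simp [hb']

theorem pvLiftFold (L : List Int) (cs : PySem.Dict String (PySem.Dict Int Int)) (c : String)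
    (h : cs.contains c = true) (hnd : cs.keys.Nodup) :
    L.foldl (fun cs i => if (cs.getD c PySem.Dict.empty).contains i then
        cs.modify c PySem.Dict.empty (fun d => d.erase i) else cs) cs
      = cs.modify c PySem.Dict.empty
          (fun d => L.foldl (fun d i => if d.contains i then d.erase i else d) d) := by
  induction L generalizing cs with
  | nil => simpa using (pvModify_id cs c h hnd).symm
  | cons i L ih =>
      simp only [List.foldl_cons]
      have hstep : (if (cs.getD c PySem.Dict.empty).contains i then
            cs.modify c PySem.Dict.empty (fun d => d.erase i) else cs)
          = cs.modify c PySem.Dict.empty (fun d => if d.contains i then d.erase i else d) := by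
        by_cases hc : (cs.getD c PySem.Dict.empty).contains i = true
        · simp [PySem.Dict.modify, hc]
        · simpa [PySem.Dict.modify, hc] using (pvModify_id cs c h hnd).symm
      rw [hstep]
      have h' : (cs.modify c PySem.Dict.empty
          (fun d => if d.contains i then d.erase i else d)).contains c = true := by
        rw [PySem.Dict.contains_modify]; simp
      have hk : (cs.modify c PySem.Dict.empty
          (fun d => if d.contains i then d.erase i else d)).keys = cs.keys := by
        rw [PySem.Dict.keys_modify, PySem.Dict.keys_insert_of_contains _ _ h]
      rw [ih _ h' (hk ▸ hnd), pvModify_modify cs c _ _ h hnd]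

theorem pvGetKeys_nil (c : String) : pvGetKeys [] c = [] := rfl

theorem pvGetKeys_cons_self (c0 : String) (v0 : List (Int × Int))
    (ann : List (String × List (Int × Int))) :
    pvGetKeys ((c0, v0) :: ann) c0 = v0.map Prod.fst := by
  simp [pvGetKeys, PySem.Dict.getD, PySem.Dict.get?]

theorem pvGetKeys_cons_ne (c0 c : String) (v0 : List (Int × Int))
    (ann : List (String × List (Int × Int))) (h : c ≠ c0) :
    pvGetKeys ((c0, v0) :: ann) c = pvGetKeys ann c := by
  have h' : (c0 == c) = false := by simpa using (Ne.symm h)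
  simp [pvGetKeys, PySem.Dict.getD, PySem.Dict.get?, List.find?, h']

theorem pvGetKeys_eq_nil_of_not_mem (ann : List (String × List (Int × Int))) (c : String)
    (h : c ∉ ann.map Prod.fst) :
    pvGetKeys ann c = [] := by
  have : (PySem.Dict.mk ann).get? c = none := by
    simp only [PySem.Dict.get?, Option.map_eq_none_iff, List.find?_eq_none]
    intro p hp
    simp only [beq_iff_eq]
    intro he
    exact h (List.mem_map.mpr ⟨p, hp, he⟩)
  simp [pvGetKeys, PySem.Dict.getD, this]

theorem pvPhase_items (ann : List (String × List (Int × Int)))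
    (cs : PySem.Dict String (PySem.Dict Int Int))
    (hann : (ann.map Prod.fst).Nodup) (hcs : cs.keys.Nodup) :
    (pvPhase cs ann).items
      = cs.items.map (fun p =>
          (p.1, PySem.Dict.mk (p.2.items.filter
            (fun q => !(pvGetKeys ann p.1).contains q.1)))) := by
  induction ann generalizing cs with
  | nil =>
      have : ∀ p ∈ cs.items,
          (p.1, PySem.Dict.mk (p.2.items.filter
            (fun q => !(pvGetKeys ([] : List (String × List (Int × Int))) p.1).contains q.1))) = p := by
        intro p _
        simp [pvGetKeys_nil]
      rw [List.map_congr_left this]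
      simp [pvPhase]
  | cons a ann ih =>
      obtain ⟨c0, v0⟩ := a
      have hann2 : (c0 :: ann.map Prod.fst).Nodup := by simpa using hann
      have hc0 : c0 ∉ ann.map Prod.fst := (List.nodup_cons.mp hann2).1
      have hann' : (ann.map Prod.fst).Nodup := (List.nodup_cons.mp hann2).2
      have hstep : pvPhase cs ((c0, v0) :: ann)
          = pvPhase (if cs.contains c0 then
              (v0.map Prod.fst).foldl (fun cs i =>
                if (cs.getD c0 PySem.Dict.empty).contains i then
                  cs.modify c0 PySem.Dict.empty (fun d => d.erase i)
                else cs) cs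
            else cs) ann := rfl
      rw [hstep]
      have hitems : (if cs.contains c0 then
              (v0.map Prod.fst).foldl (fun cs i =>
                if (cs.getD c0 PySem.Dict.empty).contains i then
                  cs.modify c0 PySem.Dict.empty (fun d => d.erase i)
                else cs) cs
            else cs).items
          = cs.items.map (fun p => if p.1 == c0 then
              (c0, PySem.Dict.mk (p.2.items.filter
                (fun q => !(v0.map Prod.fst).contains q.1))) else p) := by
        by_cases hc : cs.contains c0 = true
        · rw [if_pos hc, pvLiftFold _ cs c0 hc hcs, pvModify_items cs c0 _ hc hcs]
          apply List.map_congr_left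
          intro p _
          by_cases hb : (p.1 == c0) = true
          · have hfn : (fun (d : PySem.Dict Int Int) i =>
                if d.contains i then d.erase i else d) = (fun d i => d.erase i) := by
              funext d i
              by_cases hh : d.contains i = true
              · simp [hh]
              · simp only [Bool.not_eq_true] at hh
                simp [hh, pvErase_of_not_contains d i hh]
            have he : (v0.map Prod.fst).foldl (fun d i => d.erase i) p.2
                = PySem.Dict.mk (p.2.items.filter
                    (fun q => !(v0.map Prod.fst).contains q.1)) := by
              apply PySem.Dict.ext
              simp [pvEraseFold_items]
            simp [hb, hfn, he]
          · simp [hb]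
        · rw [if_neg hc]
          have : ∀ p ∈ cs.items, (if p.1 == c0 then
              (c0, PySem.Dict.mk (p.2.items.filter
                (fun q => !(v0.map Prod.fst).contains q.1))) else p) = p := by
            intro p hp
            have : (p.1 == c0) = false := by
              simp only [Bool.not_eq_true] at hc
              simp only [PySem.Dict.contains, List.any_eq_false] at hc
              simpa using hc p hp
            simp [this]
          rw [List.map_congr_left this]; simp
      have hkeys : (if cs.contains c0 then
              (v0.map Prod.fst).foldl (fun cs i =>
                if (cs.getD c0 PySem.Dict.empty).contains i then
                  cs.modify c0 PySem.Dict.empty (fun d => d.erase i)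
                else cs) cs
            else cs).keys = cs.keys := by
        simp only [PySem.Dict.keys, hitems, List.map_map]
        apply List.map_congr_left
        intro p _
        by_cases hb : p.1 = c0
        · simp [hb]
        · simp [hb]
      rw [ih _ hann' (hkeys ▸ hcs), hitems, List.map_map]
      apply List.map_congr_left
      intro p _
      by_cases hb : p.1 = c0
      · subst hb
        simp [pvGetKeys_cons_self, pvGetKeys_eq_nil_of_not_mem ann p.1 hc0]
      · simp [hb, pvGetKeys_cons_ne c0 p.1 v0 ann hb]

theorem pvPhase_keys (ann : List (String × List (Int × Int)))
    (cs : PySem.Dict String (PySem.Dict Int Int))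
    (hann : (ann.map Prod.fst).Nodup) (hcs : cs.keys.Nodup) :
    (pvPhase cs ann).keys = cs.keys := by
  simp [PySem.Dict.keys, pvPhase_items ann cs hann hcs, List.map_map]

-- ===== VERDICT (by name: the statement is the Claim_ definition above) =====
theorem get_intergenic_sites_spec : Claim_equal_get_intergenic_sites := by
  intro cs gs ps ms us flag _hdom hpre
  obtain ⟨h1, h2, h3, h4, h5⟩ := hpre
  unfold Spec_get_intergenic_sites
  simp only [get_intergenic_sites, get_intergenic_sites_alt]
  have hk0 : (PySem.Dict.mk (cs.map (fun p => (p.1, PySem.Dict.mk p.2)))).keys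
      = cs.map Prod.fst := by
    simp [PySem.Dict.keys, List.map_map]
  have hnd0 : (PySem.Dict.mk (cs.map (fun p => (p.1, PySem.Dict.mk p.2)))).keys.Nodup := by
    rw [hk0]; exact h1
  cases flag with
  | false =>
      simp only [show ((((false : Bool) == true) = true)) = False by simp, if_false]
      rw [pvPhase_items gs _ h2 hnd0]
      show (List.map _ (List.map _ (cs.map (fun p => (p.1, PySem.Dict.mk p.2))))) = _
      simp only [List.map_map]
      apply List.map_congr_left
      intro p _
      simp only [Function.comp]
      refine congrArg _ ?_
      apply List.filter_congr
      intro q _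
      rw [Bool.eq_iff_iff]
      simp [PySem.Set.mem_ofList]
  | true =>
      simp only [show ((((true : Bool) == true) = true)) = True by simp, if_true]
      have hnd1 : (pvPhase (PySem.Dict.mk (cs.map (fun p => (p.1, PySem.Dict.mk p.2)))) gs).keys.Nodup := by
        rw [pvPhase_keys gs _ h2 hnd0]; exact hnd0
      have hnd2 : (pvPhase (pvPhase (PySem.Dict.mk (cs.map (fun p => (p.1, PySem.Dict.mk p.2)))) gs) ps).keys.Nodup := by
        rw [pvPhase_keys ps _ h3 hnd1]; exact hnd1
      have hnd3 : (pvPhase (pvPhase (pvPhase (PySem.Dict.mk (cs.map (fun p => (p.1, PySem.Dict.mk p.2)))) gs) ps) ms).keys.Nodup := by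
        rw [pvPhase_keys ms _ h4 hnd2]; exact hnd2
      rw [pvPhase_items us _ h5 hnd3, pvPhase_items ms _ h4 hnd2,
          pvPhase_items ps _ h3 hnd1, pvPhase_items gs _ h2 hnd0]
      show (List.map _ (List.map _ (List.map _ (List.map _ (List.map _ (cs.map (fun p => (p.1, PySem.Dict.mk p.2)))))))) = _
      simp only [List.map_map]
      apply List.map_congr_left
      intro p _
      simp only [Function.comp]
      simp only [List.filter_filter]
      refine congrArg _ ?_
      apply List.filter_congr
      intro q _
      rw [Bool.eq_iff_iff]
      simp only [Bool.and_eq_true, Bool.not_eq_true', ← Bool.not_eq_true]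
      simp [PySem.Set.mem_update, PySem.Set.mem_ofList]
      tauto
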